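-- pv_equiv track=rewrite | github.com/a4amado/Competitive-Programming | code360/ninja-and-his-friends_3125885.py | maximumChocolates
-- ===== SOURCE A (Python) =====
-- from typing import Dict, List, Tuple
-- from typing import List
--
-- def maximumChocolates(r: int, c: int, grid: List[List[int]]) -> int:
--     # Initialize a 3D DP table with dimensions (r x c x c)
--     dp = [[[0] * c for _ in range(c)] for _ in range(r)]
--
--     # Base case: fill the first row
--     for a in range(c):
--         for b in range(c):
--             dp[0][a][b] = grid[0][a] + (grid[0][b] if a != b else 0)
--
--     # Fill the DP table from the second row onwards
--     for row in range(1, r):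
--         for a in range(c):
--             for b in range(c):
--                 max_chocolates = -float('inf')
--
--                 # Explore all possible moves for both friends (move left, stay, or move right)
--                 for da in [-1, 0, 1]:
--                     for db in [-1, 0, 1]:
--                         na, nb = a + da, b + db
--                         if 0 <= na < c and 0 <= nb < c:
--                             chocolates = grid[row][a] + (grid[row][b] if a != b else 0)
--                             max_chocolates = max(max_chocolates, dp[row-1][na][nb] + chocolates)
--
--                 dp[row][a][b] = max_chocolates
--
--     # The result will be the maximum value in the last row for any (a, b) pair
--     result = max(dp[r-1][a][b] for a in range(c) for b in range(c))
--     return result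
-- ===== SOURCE B (Python) =====
-- from typing import List
--
-- def maximumChocolates(r: int, c: int, grid: List[List[int]]) -> int:
--     # Top-down memoized recursion over (row, a, b) instead of A's 3D bottom-up table.
--     memo = {}
--
--     def solve(row, a, b):
--         key = (row, a, b)
--         if key in memo:
--             return memo[key]
--         gain = grid[row][a] + (grid[row][b] if a != b else 0)
--         if row == 0:
--             res = gain
--         else:
--             best = None
--             for na in (a - 1, a, a + 1):
--                 if 0 <= na < c:
--                     for nb in (b - 1, b, b + 1):
--                         if 0 <= nb < c:
--                             v = solve(row - 1, na, nb)
--                             if best is None or v > best: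
--                                 best = v
--             res = gain + best
--         memo[key] = res
--         return res
--
--     return max(solve(r - 1, a, b) for a in range(c) for b in range(c))
-- ===== Notes on version B (the rewrite author's own statement) =====
-- stated objective: alternative
-- what changed: Replaces A's bottom-up 3D DP table (preallocated r*c*c list with nested index loops and a -inf sentinel) by top-down memoized recursion solve(row,a,b) over a dict cache, with the answer taken as max over solve(r-1,a,b).
import Mathlib
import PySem

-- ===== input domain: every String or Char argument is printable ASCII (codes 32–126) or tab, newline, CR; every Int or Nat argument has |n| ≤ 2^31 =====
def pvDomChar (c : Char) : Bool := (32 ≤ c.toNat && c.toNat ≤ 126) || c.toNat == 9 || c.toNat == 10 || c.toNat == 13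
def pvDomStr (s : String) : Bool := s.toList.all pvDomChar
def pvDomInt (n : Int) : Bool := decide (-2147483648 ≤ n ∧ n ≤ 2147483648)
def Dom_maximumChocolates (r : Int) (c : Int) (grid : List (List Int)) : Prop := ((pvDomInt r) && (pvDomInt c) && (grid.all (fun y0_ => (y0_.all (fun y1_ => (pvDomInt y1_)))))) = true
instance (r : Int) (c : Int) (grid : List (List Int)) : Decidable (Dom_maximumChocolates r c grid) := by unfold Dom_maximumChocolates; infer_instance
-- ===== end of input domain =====

-- B re-implements A's 3D bottom-up DP as top-down memoized recursion over (row, a, b);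
-- same return value on Pre_, no speed claim.

-- ===== PORT A =====

-- grid[i][j] read; the default 0 is only reached on IndexError inputs, excluded by Pre_
def pvAt (grid : List (List Int)) (i j : Int) : Int :=
  PySem.List.pyGetD (PySem.List.pyGetD grid i []) j 0

-- dp[i][j][k] read; default 0 only on IndexError inputs, excluded by Pre_
def pvGet3 (dp : List (List (List Int))) (i j k : Int) : Int :=
  PySem.List.pyGetD (PySem.List.pyGetD (PySem.List.pyGetD dp i []) j []) k 0

-- dp[i][j][k] = v; every write index in A comes from a range(...) so it is ≥ 0 and toNat is exact
def pvSet3 (dp : List (List (List Int))) (i j k : Int) (v : Int) : List (List (List Int)) :=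
  dp.modify i.toNat (fun L => L.modify j.toNat (fun row => row.set k.toNat v))

def maximumChocolates (r : Int) (c : Int) (grid : List (List Int)) : Int :=
  let dp : List (List (List Int)) :=
    (PySem.List.pyRange 0 r 1).map (fun _ =>
      (PySem.List.pyRange 0 c 1).map (fun _ => List.replicate c.toNat (0 : Int)))
  let dp := (PySem.List.pyRange 0 c 1).foldl (fun dp a =>
      (PySem.List.pyRange 0 c 1).foldl (fun dp b =>
        pvSet3 dp 0 a b (pvAt grid 0 a + (if a ≠ b then pvAt grid 0 b else 0))) dp) dp
  let dp := (PySem.List.pyRange 1 r 1).foldl (fun dp row =>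
      (PySem.List.pyRange 0 c 1).foldl (fun dp a =>
        (PySem.List.pyRange 0 c 1).foldl (fun dp b =>
          -- max_chocolates : Option Int; none encodes -float('inf')
          let mc : Option Int :=
            ([-1, 0, 1] : List Int).foldl (fun mc da =>
              ([-1, 0, 1] : List Int).foldl (fun mc db =>
                let na := a + da
                let nb := b + db
                if 0 ≤ na ∧ na < c ∧ 0 ≤ nb ∧ nb < c then
                  let chocolates := pvAt grid row a + (if a ≠ b then pvAt grid row b else 0)
                  some (match mc with
                        | none => pvGet3 dp (row - 1) na nb + chocolates
                        | some m => max m (pvGet3 dp (row - 1) na nb + chocolates))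
                else mc) mc) none
          -- storing none (-inf) never happens for a, b in range(c): da = db = 0 is always valid
          pvSet3 dp row a b (mc.getD 0)) dp) dp) dp
  -- max(...) over the generator; none = ValueError on the empty generator (c ≤ 0), excluded by Pre_
  (PySem.List.max? ((PySem.List.pyRange 0 c 1).flatMap (fun a =>
      (PySem.List.pyRange 0 c 1).map (fun b => pvGet3 dp (r - 1) a b))) (fun x => x)).getD 0

-- ===== PORT B =====

-- solve(row, a, b) with the memo dict threaded through; row is the Nat the recursion descends on
-- (every Python call passes row ≥ 0), the memo key stores it as the Python int.
def pvB_solve (grid : List (List Int)) (c : Int) (row : Nat) (a b : Int)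
    (memo : PySem.Dict (Int × Int × Int) Int) : Int × PySem.Dict (Int × Int × Int) Int :=
  let key : Int × Int × Int := ((row : Int), a, b)
  match memo.get? key with
  | some v => (v, memo)
  | none =>
    let gain := PySem.List.pyGetD (PySem.List.pyGetD grid (row : Int) []) a 0 +
      (if a ≠ b then PySem.List.pyGetD (PySem.List.pyGetD grid (row : Int) []) b 0 else 0)
    let rm : Int × PySem.Dict (Int × Int × Int) Int :=
      match row with
      | 0 => (gain, memo)
      | prow + 1 =>
        let s := ([a - 1, a, a + 1] : List Int).foldl
            (fun (s : Option Int × PySem.Dict (Int × Int × Int) Int) na =>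
              if 0 ≤ na ∧ na < c then
                ([b - 1, b, b + 1] : List Int).foldl
                  (fun (s : Option Int × PySem.Dict (Int × Int × Int) Int) nb =>
                    if 0 ≤ nb ∧ nb < c then
                      let vm := pvB_solve grid c prow na nb s.2
                      ((match s.1 with
                        | none => some vm.1
                        | some best => if best < vm.1 then some vm.1 else some best), vm.2)
                    else s) s
              else s) (none, memo)
        -- s.1 = none would be Python's 'gain + None' TypeError: unreachable, na = a, nb = b is always valid here
        (gain + s.1.getD 0, s.2)
    (rm.1, rm.2.insert key rm.1)

def maximumChocolates_alt (r : Int) (c : Int) (grid : List (List Int)) : Int :=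
  -- solve(r - 1, a, b): r - 1 ≥ 0 under Pre_, so toNat is exact; the generator threads the memo
  let s := ((PySem.List.pyRange 0 c 1).flatMap (fun a =>
      (PySem.List.pyRange 0 c 1).map (fun b => (a, b)))).foldl
    (fun (s : List Int × PySem.Dict (Int × Int × Int) Int) ab =>
      let vm := pvB_solve grid c (r - 1).toNat ab.1 ab.2 s.2
      (s.1 ++ [vm.1], vm.2)) ([], PySem.Dict.empty)
  -- max(...) over the generator; none = ValueError on the empty generator (c ≤ 0), excluded by Pre_
  (PySem.List.max? s.1 (fun x => x)).getD 0

-- ===== PRECONDITION & SPEC =====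

-- Exactly the inputs where the Python A returns normally: r, c ≥ 1 (otherwise IndexError on dp[0]
-- or ValueError on max(empty)), and the first r rows of grid exist and have at least c entries
-- (otherwise IndexError on grid[row][a]).
def Pre_maximumChocolates (r : Int) (c : Int) (grid : List (List Int)) : Prop :=
  1 ≤ r ∧ 1 ≤ c ∧ r ≤ (grid.length : Int) ∧
    ∀ row ∈ grid.take r.toNat, c ≤ (row.length : Int)
instance (r : Int) (c : Int) (grid : List (List Int)) : Decidable (Pre_maximumChocolates r c grid) := by
  unfold Pre_maximumChocolates; infer_instance

def pvWitness_maximumChocolates : Int × Int × List (List Int) := (2, 2, [[1, 2], [3, 4]])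

def Spec_maximumChocolates (r : Int) (c : Int) (grid : List (List Int)) (out : Int) : Prop := out = maximumChocolates_alt r c grid
instance (r : Int) (c : Int) (grid : List (List Int)) (out : Int) : Decidable (Spec_maximumChocolates r c grid out) := by unfold Spec_maximumChocolates; infer_instance

-- ===== CLAIM (what is proved, stated in full; the proofs are below) =====
def Claim_equal_maximumChocolates : Prop := ∀ (r : Int) (c : Int) (grid : List (List Int)), Dom_maximumChocolates r c grid → Pre_maximumChocolates r c grid → Spec_maximumChocolates r c grid (maximumChocolates r c grid)

-- ===== LEMMAS AND PROOFS =====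

-- The value recursion both programs compute: pvV grid c row a b is the DP value of
-- state (row, a, b).
def pvOmax (o : Option Int) (x : Int) : Option Int :=
  some (match o with | none => x | some m => max m x)

def pvNbrs (c : Int) (a b : Int) : List (Int × Int) :=
  (([a - 1, a, a + 1] : List Int).filter (fun na => decide (0 ≤ na ∧ na < c))).flatMap
    (fun na => (([b - 1, b, b + 1] : List Int).filter (fun nb => decide (0 ≤ nb ∧ nb < c))).map
      (fun nb => (na, nb)))

def pvCell (grid : List (List Int)) (row a b : Int) : Int :=
  pvAt grid row a + (if a ≠ b then pvAt grid row b else 0)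

def pvV (grid : List (List Int)) (c : Int) : Nat → Int → Int → Int
  | 0, a, b => pvCell grid 0 a b
  | n + 1, a, b =>
    pvCell grid ((n : Int) + 1) a b +
      (((pvNbrs c a b).map (fun p => pvV grid c n p.1 p.2)).foldl pvOmax none).getD 0

def pvPairs (c : Int) : List (Int × Int) :=
  (PySem.List.pyRange 0 c 1).flatMap (fun a =>
    (PySem.List.pyRange 0 c 1).map (fun b => (a, b)))

-- ---- generic small lemmas ----

theorem pv_foldl3_shift {δ : Type} (G : δ → Int → δ) (a : Int) (s : δ) :
    ([(-1 : Int), 0, 1]).foldl (fun s da => G s (a + da)) s = ([a - 1, a, a + 1] : List Int).foldl G s := by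
  have e1 : a + (-1) = a - 1 := by ring
  simp [List.foldl, e1]

theorem pv_nested_guard_fold_eq {δ : Type} (c a b : Int) (step : δ → Int × Int → δ) (s : δ) :
    ([a - 1, a, a + 1] : List Int).foldl (fun s na =>
      if 0 ≤ na ∧ na < c then
        ([b - 1, b, b + 1] : List Int).foldl (fun s nb =>
          if 0 ≤ nb ∧ nb < c then step s (na, nb) else s) s
      else s) s
    = (pvNbrs c a b).foldl step s := by
  simp only [pvNbrs, List.foldl_flatMap, List.foldl_map, PySem.List.foldl_ite_eq_foldl_filter]

theorem pv_mem_pvNbrs {c a b : Int} {p : Int × Int} (h : p ∈ pvNbrs c a b) :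
    0 ≤ p.1 ∧ p.1 < c ∧ 0 ≤ p.2 ∧ p.2 < c := by
  simp only [pvNbrs, List.mem_flatMap, List.mem_map, List.mem_filter] at h
  obtain ⟨na, ⟨-, hna⟩, nb, ⟨-, hnb⟩, rfl⟩ := h
  simp only [decide_eq_true_eq] at hna hnb
  exact ⟨hna.1, hna.2, hnb.1, hnb.2⟩

theorem pv_self_mem_pvNbrs {c a b : Int} (ha : 0 ≤ a ∧ a < c) (hb : 0 ≤ b ∧ b < c) :
    (a, b) ∈ pvNbrs c a b := by
  simp only [pvNbrs, List.mem_flatMap, List.mem_map, List.mem_filter]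
  exact ⟨a, ⟨by simp, by simpa using ha⟩, b, ⟨by simp, by simpa using hb⟩, rfl⟩

theorem pv_foldl_pvOmax_some (xs : List Int) : ∀ x : Int,
    xs.foldl pvOmax (some x) = some (xs.foldl max x) := by
  induction xs with
  | nil => intro x; rfl
  | cons y t ih => intro x; simpa [pvOmax] using ih (max x y)

theorem pv_foldl_max_map_add (xs : List Int) (t : Int) : ∀ x : Int,
    (xs.map (fun v => v + t)).foldl max (x + t) = xs.foldl max x + t := by
  induction xs with
  | nil => intro x; rfl
  | cons y ys ih =>
      intro x
      simpa [max_add_add_right] using ih (max x y)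

theorem pv_foldl_pvOmax_add (ys : List Int) (t : Int) (hne : ys ≠ []) :
    ((ys.map (fun v => v + t)).foldl pvOmax none).getD 0
      = ((ys.foldl pvOmax none).getD 0) + t := by
  cases ys with
  | nil => exact absurd rfl hne
  | cons y t' =>
      simp only [List.map_cons, List.foldl_cons]
      have h1 : pvOmax none (y + t) = some (y + t) := rfl
      have h2 : pvOmax none y = some y := rfl
      rw [h1, h2, pv_foldl_pvOmax_some, pv_foldl_pvOmax_some, pv_foldl_max_map_add]
      simp

-- ---- getD / modify / set lemmas ----

theorem pv_getD_modify_eq {α : Type} (l : List α) (i : Nat) (f : α → α) (d : α) (h : i < l.length) :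
    (l.modify i f).getD i d = f (l.getD i d) := by
  simp [List.getD_eq_getElem?_getD, List.getElem?_eq_getElem h]

theorem pv_getD_modify_ne {α : Type} (l : List α) (i j : Nat) (f : α → α) (d : α) (h : i ≠ j) :
    (l.modify i f).getD j d = l.getD j d := by
  simp [List.getD_eq_getElem?_getD, h]

theorem pv_getD_set_eq {α : Type} (l : List α) (i : Nat) (v : α) (d : α) (h : i < l.length) :
    (l.set i v).getD i d = v := by
  simp [List.getD_eq_getElem?_getD, h]

theorem pv_getD_set_ne {α : Type} (l : List α) (i j : Nat) (v : α) (d : α) (h : i ≠ j) :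
    (l.set i v).getD j d = l.getD j d := by
  simp [List.getD_eq_getElem?_getD, h]

-- ---- the dp table: shape, reads, writes ----

def pvShape (r c : Int) (dp : List (List (List Int))) : Prop :=
  dp.length = r.toNat ∧
    ∀ i : Nat, i < r.toNat →
      (dp.getD i []).length = c.toNat ∧
        ∀ j : Nat, j < c.toNat → ((dp.getD i []).getD j []).length = c.toNat

theorem pvGet3_eq_getD (dp : List (List (List Int))) {i j k : Int}
    (hi : 0 ≤ i) (hj : 0 ≤ j) (hk : 0 ≤ k) :
    pvGet3 dp i j k = ((dp.getD i.toNat []).getD j.toNat []).getD k.toNat 0 := by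
  simp [pvGet3, PySem.List.pyGetD_of_nonneg _ _ hi, PySem.List.pyGetD_of_nonneg _ _ hj,
    PySem.List.pyGetD_of_nonneg _ _ hk]

theorem pv_layer_set3_ne (dp : List (List (List Int))) (i j k : Int) (v : Int) (i' : Int)
    (h : i' ≠ i) (hi : 0 ≤ i) (hi' : 0 ≤ i') :
    PySem.List.pyGetD (pvSet3 dp i j k v) i' [] = PySem.List.pyGetD dp i' [] := by
  have hne : i.toNat ≠ i'.toNat := by omega
  simp only [pvSet3]
  rw [PySem.List.pyGetD_of_nonneg _ _ hi', PySem.List.pyGetD_of_nonneg _ _ hi']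
  exact pv_getD_modify_ne _ _ _ _ _ hne

theorem pv_shape_set3 {r c : Int} {dp : List (List (List Int))} (hs : pvShape r c dp)
    {i j k : Int} (v : Int) (hi : 0 ≤ i) (hir : i < r) (hj : 0 ≤ j) (hjc : j < c)
    (hk : 0 ≤ k) (hkc : k < c) : pvShape r c (pvSet3 dp i j k v) := by
  obtain ⟨hlen, hrow⟩ := hs
  refine ⟨by simp [pvSet3, hlen], ?_⟩
  intro i2 hi2
  by_cases he : i.toNat = i2
  · subst he
    have h1 := hrow i.toNat (by omega)
    rw [show pvSet3 dp i j k v = dp.modify i.toNat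
        (fun L => L.modify j.toNat (fun row => row.set k.toNat v)) from rfl,
      pv_getD_modify_eq _ _ _ _ (by omega)]
    refine ⟨by simp only [List.length_modify]; exact h1.1, ?_⟩
    intro j2 hj2
    by_cases hje : j.toNat = j2
    · subst hje
      rw [pv_getD_modify_eq _ _ _ _ (by rw [h1.1]; omega)]
      simpa [List.length_set] using (h1.2 j.toNat (by omega))
    · rw [pv_getD_modify_ne _ _ _ _ _ hje]
      exact h1.2 j2 hj2
  · rw [show pvSet3 dp i j k v = dp.modify i.toNat
        (fun L => L.modify j.toNat (fun row => row.set k.toNat v)) from rfl,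
      pv_getD_modify_ne _ _ _ _ _ he]
    exact hrow i2 hi2

theorem pv_get3_set3 {r c : Int} {dp : List (List (List Int))} (hs : pvShape r c dp)
    {i j k : Int} (v : Int) (hi : 0 ≤ i) (hir : i < r) (hj : 0 ≤ j) (hjc : j < c)
    (hk : 0 ≤ k) (hkc : k < c)
    {i' j' k' : Int} (hi' : 0 ≤ i') (hj' : 0 ≤ j') (hk' : 0 ≤ k') :
    pvGet3 (pvSet3 dp i j k v) i' j' k'
      = if i' = i ∧ j' = j ∧ k' = k then v else pvGet3 dp i' j' k' := by
  obtain ⟨hlen, hrow⟩ := hs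
  have h1 := hrow i.toNat (by omega)
  rw [pvGet3_eq_getD _ hi' hj' hk', pvGet3_eq_getD _ hi' hj' hk']
  rw [show pvSet3 dp i j k v = dp.modify i.toNat
      (fun L => L.modify j.toNat (fun row => row.set k.toNat v)) from rfl]
  by_cases he : i' = i
  · subst he
    rw [pv_getD_modify_eq _ _ _ _ (by omega)]
    by_cases hje : j' = j
    · subst hje
      rw [pv_getD_modify_eq _ _ _ _ (by rw [h1.1]; omega)]
      by_cases hke : k' = k
      · subst hke
        rw [pv_getD_set_eq _ _ _ _ (by rw [h1.2 j'.toNat (by omega)]; omega)]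
        simp
      · rw [pv_getD_set_ne _ _ _ _ _ (by omega)]
        simp [hke]
    · rw [pv_getD_modify_ne _ _ _ _ _ (by omega)]
      simp [hje]
  · rw [pv_getD_modify_ne _ _ _ _ _ (by omega)]
    simp [he]

-- ---- B side: the memoized recursion computes pvV ----

def pvInv (grid : List (List Int)) (c : Int) (memo : PySem.Dict (Int × Int × Int) Int) : Prop :=
  ∀ (ro a b v : Int), memo.get? (ro, a, b) = some v →
    ∃ n : Nat, ro = (n : Int) ∧ v = pvV grid c n a b

theorem pv_match_omax (o : Option Int) (v : Int) :
    (match o with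
      | none => some v
      | some best => if best < v then some v else some best) = pvOmax o v := by
  cases o with
  | none => rfl
  | some best =>
      by_cases h : best < v
      · simp [pvOmax, h, max_eq_right h.le]
      · simp [pvOmax, h, max_eq_left (not_lt.mp h)]

theorem pvInv_empty (grid : List (List Int)) (c : Int) : pvInv grid c PySem.Dict.empty := by
  intro ro a b v hv
  simp [PySem.Dict.get?_empty] at hv

theorem pvInv_insert {grid : List (List Int)} {c : Int} {memo} (h : pvInv grid c memo)
    (n : Nat) (a b : Int) :
    pvInv grid c (memo.insert ((n : Int), a, b) (pvV grid c n a b)) := by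
  intro ro a' b' v hv
  rw [PySem.Dict.get?_insert] at hv
  split at hv
  · rename_i heq
    simp only [Prod.mk.injEq] at heq
    obtain ⟨rfl, rfl, rfl⟩ := heq
    exact ⟨n, rfl, (Option.some.inj hv).symm⟩
  · exact h ro a' b' v hv

def pvBStep (grid : List (List Int)) (c : Int) (prow : Nat)
    (s : Option Int × PySem.Dict (Int × Int × Int) Int) (p : Int × Int) :
    Option Int × PySem.Dict (Int × Int × Int) Int :=
  ((match s.1 with
    | none => some (pvB_solve grid c prow p.1 p.2 s.2).1
    | some best =>
        if best < (pvB_solve grid c prow p.1 p.2 s.2).1 then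
          some (pvB_solve grid c prow p.1 p.2 s.2).1
        else some best),
   (pvB_solve grid c prow p.1 p.2 s.2).2)

theorem pvB_fold_pairs (grid : List (List Int)) (c : Int) (prow : Nat)
    (IH : ∀ (a b : Int) (memo), pvInv grid c memo →
      (pvB_solve grid c prow a b memo).1 = pvV grid c prow a b ∧
      pvInv grid c (pvB_solve grid c prow a b memo).2) :
    ∀ (L : List (Int × Int)) (s : Option Int × PySem.Dict (Int × Int × Int) Int),
      pvInv grid c s.2 →
      (L.foldl (pvBStep grid c prow) s).1
          = (L.map (fun p => pvV grid c prow p.1 p.2)).foldl pvOmax s.1 ∧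
      pvInv grid c (L.foldl (pvBStep grid c prow) s).2 := by
  intro L
  induction L with
  | nil => intro s hs; exact ⟨rfl, hs⟩
  | cons p t ih =>
      intro s hs
      obtain ⟨hv, hm⟩ := IH p.1 p.2 s.2 hs
      have step : pvBStep grid c prow s p
          = (pvOmax s.1 (pvV grid c prow p.1 p.2), (pvB_solve grid c prow p.1 p.2 s.2).2) := by
        rw [pvBStep, pv_match_omax, hv]
      rw [List.foldl_cons, step, List.map_cons, List.foldl_cons]
      simpa using ih _ hm

theorem pvB_guard_fold (grid : List (List Int)) (c : Int) (prow : Nat) (a b : Int)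
    (s0 : Option Int × PySem.Dict (Int × Int × Int) Int) :
    ([a - 1, a, a + 1] : List Int).foldl (fun s na =>
      if 0 ≤ na ∧ na < c then
        ([b - 1, b, b + 1] : List Int).foldl (fun s nb =>
          if 0 ≤ nb ∧ nb < c then
            ((match s.1 with
              | none => some (pvB_solve grid c prow na nb s.2).1
              | some best =>
                  if best < (pvB_solve grid c prow na nb s.2).1 then
                    some (pvB_solve grid c prow na nb s.2).1
                  else some best),
             (pvB_solve grid c prow na nb s.2).2)
          else s) s
      else s) s0
    = (pvNbrs c a b).foldl (pvBStep grid c prow) s0 := by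
  simp only [pvNbrs, List.foldl_flatMap, List.foldl_map, PySem.List.foldl_ite_eq_foldl_filter,
    pvBStep]

theorem pvB_solve_correct (grid : List (List Int)) (c : Int) :
    ∀ (row : Nat) (a b : Int) (memo), pvInv grid c memo →
      (pvB_solve grid c row a b memo).1 = pvV grid c row a b ∧
      pvInv grid c (pvB_solve grid c row a b memo).2 := by
  intro row
  induction row with
  | zero =>
      intro a b memo hm
      rw [pvB_solve]
      cases h : memo.get? (((0 : Nat) : Int), a, b) with
      | some v =>
          obtain ⟨n, hn, hv⟩ := hm _ _ _ _ h
          have : n = 0 := by omega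
          subst this
          exact ⟨by simp [h, hv], by simpa [h] using hm⟩
      | none =>
          simp only [h]
          constructor
          · simp [pvV, pvCell, pvAt]
          · have : (PySem.List.pyGetD (PySem.List.pyGetD grid ((0 : Nat) : Int) []) a 0 +
                  if a ≠ b then PySem.List.pyGetD (PySem.List.pyGetD grid ((0 : Nat) : Int) []) b 0 else 0)
                = pvV grid c 0 a b := by
              simp [pvV, pvCell, pvAt]
            rw [this]
            exact pvInv_insert hm 0 a b
  | succ prow IH =>
      intro a b memo hm
      rw [pvB_solve]
      cases h : memo.get? (((prow + 1 : Nat) : Int), a, b) with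
      | some v =>
          obtain ⟨n, hn, hv⟩ := hm _ _ _ _ h
          have : n = prow + 1 := by omega
          subst this
          exact ⟨by simp [h, hv], by simpa [h] using hm⟩
      | none =>
          simp only [h]
          have hpairs := pvB_fold_pairs grid c prow IH (pvNbrs c a b) (none, memo) hm
          rw [pvB_guard_fold]
          have hval : (PySem.List.pyGetD (PySem.List.pyGetD grid (((prow + 1 : Nat)) : Int) []) a 0 +
                if a ≠ b then PySem.List.pyGetD (PySem.List.pyGetD grid (((prow + 1 : Nat)) : Int) []) b 0 else 0) +
              (List.foldl (pvBStep grid c prow) (none, memo) (pvNbrs c a b)).1.getD 0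
              = pvV grid c (prow + 1) a b := by
            rw [hpairs.1]
            simp [pvV, pvCell, pvAt, Nat.cast_add, Nat.cast_one]
          refine ⟨hval, ?_⟩
          rw [hval]
          exact pvInv_insert hpairs.2 (prow + 1) a b

theorem pvB_vals (grid : List (List Int)) (c : Int) (rr : Nat) :
    ∀ (L : List (Int × Int)) (s : List Int × PySem.Dict (Int × Int × Int) Int), pvInv grid c s.2 →
      (L.foldl (fun s ab =>
          (s.1 ++ [(pvB_solve grid c rr ab.1 ab.2 s.2).1], (pvB_solve grid c rr ab.1 ab.2 s.2).2)) s).1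
        = s.1 ++ L.map (fun ab => pvV grid c rr ab.1 ab.2) := by
  intro L
  induction L with
  | nil => intro s hs; simp
  | cons p t ih =>
      intro s hs
      obtain ⟨hv, hm⟩ := pvB_solve_correct grid c rr p.1 p.2 s.2 hs
      rw [List.foldl_cons, ih _ hm]
      simp [hv]

theorem pvB_alt_eq (r c : Int) (grid : List (List Int)) :
    maximumChocolates_alt r c grid
      = (PySem.List.max? ((pvPairs c).map (fun ab => pvV grid c (r - 1).toNat ab.1 ab.2))
          (fun x => x)).getD 0 := by
  rw [maximumChocolates_alt]
  rw [pvB_vals grid c (r - 1).toNat _ ([], PySem.Dict.empty) (pvInv_empty grid c)]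
  simp [pvPairs]

-- ---- A side: the bottom-up table computes pvV ----

def pvGMC (grid : List (List Int)) (c : Int) (dp : List (List (List Int))) (row a b : Int) : Int :=
  (([-1, 0, 1] : List Int).foldl (fun mc da =>
      ([-1, 0, 1] : List Int).foldl (fun mc db =>
        if 0 ≤ a + da ∧ a + da < c ∧ 0 ≤ b + db ∧ b + db < c then
          pvOmax mc (pvGet3 dp (row - 1) (a + da) (b + db) +
            (pvAt grid row a + if a ≠ b then pvAt grid row b else 0))
        else mc) mc) none).getD 0

theorem pv_get3_set3_row_ne (dp : List (List (List Int))) (i j k v i' : Int)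
    (hne : i' ≠ i) (hi : 0 ≤ i) (hi' : 0 ≤ i') :
    ∀ j' k', pvGet3 (pvSet3 dp i j k v) i' j' k' = pvGet3 dp i' j' k' := by
  intro j' k'
  simp only [pvGet3]
  rw [pv_layer_set3_ne dp i j k v i' hne hi hi']

theorem pv_guard_to_nbrs (c a b : Int) (f : Int → Int → Int) :
    (([-1, 0, 1] : List Int).foldl (fun mc da =>
        ([-1, 0, 1] : List Int).foldl (fun mc db =>
          if 0 ≤ a + da ∧ a + da < c ∧ 0 ≤ b + db ∧ b + db < c then
            pvOmax mc (f (a + da) (b + db))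
          else mc) mc) none)
      = ((pvNbrs c a b).map (fun p => f p.1 p.2)).foldl pvOmax none := by
  rw [List.foldl_map]
  have hpoint : ∀ (mc : Option Int) (na : Int),
      ([-1, 0, 1] : List Int).foldl (fun mc db =>
        if 0 ≤ na ∧ na < c ∧ 0 ≤ b + db ∧ b + db < c then
          pvOmax mc (f na (b + db)) else mc) mc
      = if 0 ≤ na ∧ na < c then
          ([b - 1, b, b + 1] : List Int).foldl (fun mc nb =>
            if 0 ≤ nb ∧ nb < c then pvOmax mc (f na nb) else mc) mc
        else mc := by
    intro mc na
    by_cases hP : 0 ≤ na ∧ na < c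
    · simp [List.foldl_cons, List.foldl_nil, hP.1, hP.2,
        show b + (-1 : Int) = b - 1 from by ring, add_zero]
    · simp only [List.foldl_cons, List.foldl_nil]
      rw [if_neg (by tauto), if_neg (by tauto), if_neg (by tauto), if_neg (by tauto)]
  calc (([-1, 0, 1] : List Int).foldl (fun mc da =>
          ([-1, 0, 1] : List Int).foldl (fun mc db =>
            if 0 ≤ a + da ∧ a + da < c ∧ 0 ≤ b + db ∧ b + db < c then
              pvOmax mc (f (a + da) (b + db))
            else mc) mc) none)
      = (([-1, 0, 1] : List Int).foldl (fun mc da =>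
          if 0 ≤ a + da ∧ a + da < c then
            ([b - 1, b, b + 1] : List Int).foldl (fun mc nb =>
              if 0 ≤ nb ∧ nb < c then pvOmax mc (f (a + da) nb) else mc) mc
          else mc) none) := by
        simp only [hpoint]
    _ = (([a - 1, a, a + 1] : List Int).foldl (fun mc na =>
          if 0 ≤ na ∧ na < c then
            ([b - 1, b, b + 1] : List Int).foldl (fun mc nb =>
              if 0 ≤ nb ∧ nb < c then pvOmax mc (f na nb) else mc) mc
          else mc) none) :=
        pv_foldl3_shift (fun mc na =>
          if 0 ≤ na ∧ na < c then
            ([b - 1, b, b + 1] : List Int).foldl (fun mc nb =>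
              if 0 ≤ nb ∧ nb < c then pvOmax mc (f na nb) else mc) mc
          else mc) a none
    _ = (pvNbrs c a b).foldl (fun o p => pvOmax o (f p.1 p.2)) none :=
        pv_nested_guard_fold_eq c a b (fun o p => pvOmax o (f p.1 p.2)) none

theorem pv_colloop {r c : Int} (ro a : Int) (g : List (List (List Int)) → Int → Int → Int)
    (hro0 : 0 ≤ ro) (hror : ro < r) (ha0 : 0 ≤ a) (hac : a < c)
    (hg : ∀ dp j k v x y, pvShape r c dp → 0 ≤ j → j < c → 0 ≤ k → k < c →
      g (pvSet3 dp ro j k v) x y = g dp x y) :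
    ∀ (L : List Int), (∀ b' ∈ L, 0 ≤ b' ∧ b' < c) → ∀ dp, pvShape r c dp →
      pvShape r c (L.foldl (fun dp b' => pvSet3 dp ro a b' (g dp a b')) dp) ∧
      (∀ x y, g (L.foldl (fun dp b' => pvSet3 dp ro a b' (g dp a b')) dp) x y = g dp x y) ∧
      (∀ i' j' k' : Int, 0 ≤ i' → 0 ≤ j' → 0 ≤ k' →
        pvGet3 (L.foldl (fun dp b' => pvSet3 dp ro a b' (g dp a b')) dp) i' j' k'
          = if i' = ro ∧ j' = a ∧ k' ∈ L then g dp a k' else pvGet3 dp i' j' k') := by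
  intro L
  induction L with
  | nil =>
      intro _ dp hs
      exact ⟨hs, fun _ _ => rfl, fun i' j' k' _ _ _ => by simp⟩
  | cons b' t ih =>
      intro hL dp hs
      have hb' := hL b' (by simp)
      have hs1 : pvShape r c (pvSet3 dp ro a b' (g dp a b')) :=
        pv_shape_set3 hs _ hro0 hror ha0 hac hb'.1 hb'.2
      have hginv1 : ∀ x y, g (pvSet3 dp ro a b' (g dp a b')) x y = g dp x y :=
        fun x y => hg dp a b' _ x y hs ha0 hac hb'.1 hb'.2
      have ihh := ih (fun x hx => hL x (by simp [hx])) (pvSet3 dp ro a b' (g dp a b')) hs1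
      rw [List.foldl_cons]
      refine ⟨ihh.1, ?_, ?_⟩
      · intro x y; rw [ihh.2.1 x y]; exact hginv1 x y
      · intro i' j' k' hi' hj' hk'
        rw [ihh.2.2 i' j' k' hi' hj' hk', hginv1 a k',
          pv_get3_set3 hs _ hro0 hror ha0 hac hb'.1 hb'.2 hi' hj' hk']
        simp only [List.mem_cons]
        split_ifs <;> simp_all

theorem pv_rowloop {r c : Int} (ro : Int) (g : List (List (List Int)) → Int → Int → Int)
    (hro0 : 0 ≤ ro) (hror : ro < r)
    (hg : ∀ dp j k v x y, pvShape r c dp → 0 ≤ j → j < c → 0 ≤ k → k < c →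
      g (pvSet3 dp ro j k v) x y = g dp x y) :
    ∀ (LA : List Int), (∀ a ∈ LA, 0 ≤ a ∧ a < c) → ∀ dp, pvShape r c dp →
      pvShape r c (LA.foldl (fun dp a => (PySem.List.pyRange 0 c 1).foldl
        (fun dp b' => pvSet3 dp ro a b' (g dp a b')) dp) dp) ∧
      (∀ x y, g (LA.foldl (fun dp a => (PySem.List.pyRange 0 c 1).foldl
        (fun dp b' => pvSet3 dp ro a b' (g dp a b')) dp) dp) x y = g dp x y) ∧
      (∀ i' j' k' : Int, 0 ≤ i' → 0 ≤ j' → 0 ≤ k' →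
        pvGet3 (LA.foldl (fun dp a => (PySem.List.pyRange 0 c 1).foldl
          (fun dp b' => pvSet3 dp ro a b' (g dp a b')) dp) dp) i' j' k'
          = if i' = ro ∧ j' ∈ LA ∧ (0 ≤ k' ∧ k' < c) then g dp j' k'
            else pvGet3 dp i' j' k') := by
  intro LA
  induction LA with
  | nil =>
      intro _ dp hs
      exact ⟨hs, fun _ _ => rfl, fun i' j' k' _ _ _ => by simp⟩
  | cons a t ih =>
      intro hLA dp hs
      have ha := hLA a (by simp)
      have hcol := pv_colloop ro a g hro0 hror ha.1 ha.2 hg (PySem.List.pyRange 0 c 1)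
        (fun x hx => by rw [PySem.List.mem_pyRange_one] at hx; exact hx) dp hs
      have ihh := ih (fun x hx => hLA x (by simp [hx])) _ hcol.1
      rw [List.foldl_cons]
      refine ⟨ihh.1, ?_, ?_⟩
      · intro x y; rw [ihh.2.1 x y, hcol.2.1 x y]
      · intro i' j' k' h1 h2 h3
        rw [ihh.2.2 i' j' k' h1 h2 h3, hcol.2.1 j' k', hcol.2.2 i' j' k' h1 h2 h3]
        simp only [List.mem_cons, PySem.List.mem_pyRange_one]
        split_ifs <;> simp_all

theorem pv_transition {c : Int} (grid : List (List Int)) (m a b : Int)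
    (hm : 1 ≤ m) (ha0 : 0 ≤ a) (hac : a < c) (hb0 : 0 ≤ b) (hbc : b < c)
    (dp : List (List (List Int)))
    (hprev : ∀ na nb : Int, 0 ≤ na → na < c → 0 ≤ nb → nb < c →
      pvGet3 dp (m - 1) na nb = pvV grid c (m - 1).toNat na nb) :
    pvGMC grid c dp m a b = pvV grid c m.toNat a b := by
  have h0 : pvGMC grid c dp m a b
      = (((pvNbrs c a b).map (fun p => pvGet3 dp (m - 1) p.1 p.2 +
          (pvAt grid m a + if a ≠ b then pvAt grid m b else 0))).foldl pvOmax none).getD 0 := by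
    have h := pv_guard_to_nbrs c a b (fun na nb => pvGet3 dp (m - 1) na nb +
      (pvAt grid m a + if a ≠ b then pvAt grid m b else 0))
    exact congrArg (fun o => Option.getD o 0) h
  rw [h0]
  have h1 : (pvNbrs c a b).map (fun p => pvGet3 dp (m - 1) p.1 p.2 +
        (pvAt grid m a + if a ≠ b then pvAt grid m b else 0))
      = ((pvNbrs c a b).map (fun p => pvV grid c (m - 1).toNat p.1 p.2)).map
          (fun v => v + (pvAt grid m a + if a ≠ b then pvAt grid m b else 0)) := by
    rw [List.map_map]
    refine List.map_congr_left (fun p hp => ?_)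
    obtain ⟨q1, q2, q3, q4⟩ := pv_mem_pvNbrs hp
    simp [Function.comp, hprev p.1 p.2 q1 q2 q3 q4]
  rw [h1, pv_foldl_pvOmax_add _ _ (by
    exact List.ne_nil_of_mem (List.mem_map_of_mem
      (pv_self_mem_pvNbrs (c := c) ⟨ha0, hac⟩ ⟨hb0, hbc⟩)))]
  have hsucc : m.toNat = (m - 1).toNat + 1 := by omega
  rw [hsucc]
  show _ = pvV grid c ((m - 1).toNat + 1) a b
  simp only [pvV]
  rw [show (((m - 1).toNat : Nat) : Int) + 1 = m from by omega]
  rw [show pvCell grid m a b = pvAt grid m a + (if a ≠ b then pvAt grid m b else 0) from rfl]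
  exact add_comm _ _

theorem pv_rowstep {r c : Int} (grid : List (List Int)) (m : Int)
    (hm1 : 1 ≤ m) (hmr : m < r) (dp : List (List (List Int))) (hs : pvShape r c dp) :
    pvShape r c ((PySem.List.pyRange 0 c 1).foldl (fun dp a =>
      (PySem.List.pyRange 0 c 1).foldl (fun dp b =>
        pvSet3 dp m a b (pvGMC grid c dp m a b)) dp) dp) ∧
    (∀ i' j' k' : Int, 0 ≤ i' → 0 ≤ j' → 0 ≤ k' →
      pvGet3 ((PySem.List.pyRange 0 c 1).foldl (fun dp a =>
        (PySem.List.pyRange 0 c 1).foldl (fun dp b =>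
          pvSet3 dp m a b (pvGMC grid c dp m a b)) dp) dp) i' j' k'
        = if i' = m ∧ (0 ≤ j' ∧ j' < c) ∧ (0 ≤ k' ∧ k' < c) then pvGMC grid c dp m j' k'
          else pvGet3 dp i' j' k') := by
  have hg : ∀ dp j k v x y, pvShape r c dp → 0 ≤ j → j < c → 0 ≤ k → k < c →
      (fun dp a b => pvGMC grid c dp m a b) (pvSet3 dp m j k v) x y
        = (fun dp a b => pvGMC grid c dp m a b) dp x y := by
    intro dp j k v x y _ _ _ _ _
    simp only [pvGMC]
    simp only [pv_get3_set3_row_ne dp m j k v (m - 1) (by omega) (by omega) (by omega)]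
  have hrl := pv_rowloop m (fun dp a b => pvGMC grid c dp m a b) (by omega) hmr hg
    (PySem.List.pyRange 0 c 1)
    (fun x hx => by rw [PySem.List.mem_pyRange_one] at hx; exact hx) dp hs
  refine ⟨hrl.1, ?_⟩
  intro i' j' k' h1 h2 h3
  have h := hrl.2.2 i' j' k' h1 h2 h3
  simpa [PySem.List.mem_pyRange_one] using h

theorem pv_mainloop {r c : Int} (grid : List (List Int)) :
    ∀ (n : Nat) (m : Int), 1 ≤ m → (r - m).toNat = n → ∀ dp, pvShape r c dp →
      (∀ i j k : Int, 0 ≤ i → i < m → i < r → 0 ≤ j → j < c → 0 ≤ k → k < c →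
        pvGet3 dp i j k = pvV grid c i.toNat j k) →
      pvShape r c ((PySem.List.pyRange m r 1).foldl
        (fun dp row => (PySem.List.pyRange 0 c 1).foldl (fun dp a =>
          (PySem.List.pyRange 0 c 1).foldl (fun dp b =>
            pvSet3 dp row a b (pvGMC grid c dp row a b)) dp) dp) dp) ∧
      (∀ i j k : Int, 0 ≤ i → i < r → 0 ≤ j → j < c → 0 ≤ k → k < c →
        pvGet3 ((PySem.List.pyRange m r 1).foldl
          (fun dp row => (PySem.List.pyRange 0 c 1).foldl (fun dp a =>
            (PySem.List.pyRange 0 c 1).foldl (fun dp b =>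
              pvSet3 dp row a b (pvGMC grid c dp row a b)) dp) dp) dp) i j k
          = pvV grid c i.toNat j k) := by
  intro n
  induction n with
  | zero =>
      intro m hm hn dp hs hinv
      have hnil : PySem.List.pyRange m r 1 = [] := PySem.List.pyRange_one_eq_nil (by omega)
      rw [hnil]
      simp only [List.foldl_nil]
      exact ⟨hs, fun i j k h1 h2 h3 h4 h5 h6 => hinv i j k h1 (by omega) h2 h3 h4 h5 h6⟩
  | succ n' ih =>
      intro m hm hn dp hs hinv
      have hmr : m < r := by omega
      rw [PySem.List.pyRange_one_cons hmr]
      simp only [List.foldl_cons]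
      have hstep := pv_rowstep grid m hm hmr dp hs
      refine ih (m + 1) (by omega) (by omega) _ hstep.1 ?_
      intro i j k h1 h2 h3 h4 h5 h6 h7
      rw [hstep.2 i j k h1 h4 h6]
      by_cases hieq : i = m
      · subst hieq
        rw [if_pos ⟨rfl, ⟨h4, h5⟩, ⟨h6, h7⟩⟩]
        exact pv_transition grid i j k hm h4 h5 h6 h7 dp
          (fun na nb q1 q2 q3 q4 =>
            hinv (i - 1) na nb (by omega) (by omega) (by omega) q1 q2 q3 q4)
      · rw [if_neg (by tauto)]
        exact hinv i j k h1 (by omega) h3 h4 h5 h6 h7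

theorem pv_dp0_shape (r c : Int) :
    pvShape r c ((PySem.List.pyRange 0 r 1).map (fun _ =>
      (PySem.List.pyRange 0 c 1).map (fun _ => List.replicate c.toNat (0 : Int)))) := by
  have hlenr : ((PySem.List.pyRange 0 r 1).map (fun _ =>
      (PySem.List.pyRange 0 c 1).map (fun _ => List.replicate c.toNat (0 : Int)))).length
        = r.toNat := by
    simp [PySem.List.length_pyRange_one]
  refine ⟨hlenr, ?_⟩
  intro i hi
  have hgd : (((PySem.List.pyRange 0 r 1).map (fun _ =>
      (PySem.List.pyRange 0 c 1).map (fun _ => List.replicate c.toNat (0 : Int)))).getD i [])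
        = (PySem.List.pyRange 0 c 1).map (fun _ => List.replicate c.toNat (0 : Int)) := by
    rw [List.getD_eq_getElem?_getD, List.getElem?_eq_getElem (by rw [hlenr]; exact hi)]
    simp
  rw [hgd]
  have hlenc : ((PySem.List.pyRange 0 c 1).map (fun _ =>
      List.replicate c.toNat (0 : Int))).length = c.toNat := by
    simp [PySem.List.length_pyRange_one]
  refine ⟨hlenc, ?_⟩
  intro j hj
  rw [List.getD_eq_getElem?_getD, List.getElem?_eq_getElem (by rw [hlenc]; exact hj)]
  simp

theorem pv_mem_pvPairs {c : Int} {p : Int × Int} (h : p ∈ pvPairs c) :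
    0 ≤ p.1 ∧ p.1 < c ∧ 0 ≤ p.2 ∧ p.2 < c := by
  simp only [pvPairs, List.mem_flatMap, List.mem_map, PySem.List.mem_pyRange_one] at h
  obtain ⟨a, ha, b, hb, rfl⟩ := h
  exact ⟨ha.1, ha.2, hb.1, hb.2⟩

theorem pvA_final (r c : Int) (grid : List (List Int)) (dp : List (List (List Int)))
    (hr : 1 ≤ r)
    (hfin : ∀ i j k : Int, 0 ≤ i → i < r → 0 ≤ j → j < c → 0 ≤ k → k < c →
      pvGet3 dp i j k = pvV grid c i.toNat j k) :
    (PySem.List.max? ((PySem.List.pyRange 0 c 1).flatMap (fun a =>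
        (PySem.List.pyRange 0 c 1).map (fun b => pvGet3 dp (r - 1) a b))) (fun x => x)).getD 0
      = (PySem.List.max? ((pvPairs c).map (fun ab => pvV grid c (r - 1).toNat ab.1 ab.2))
          (fun x => x)).getD 0 := by
  have hlist : (PySem.List.pyRange 0 c 1).flatMap (fun a =>
        (PySem.List.pyRange 0 c 1).map (fun b => pvGet3 dp (r - 1) a b))
      = (pvPairs c).map (fun ab => pvGet3 dp (r - 1) ab.1 ab.2) := by
    simp [pvPairs, List.map_flatMap, List.map_map, Function.comp_def]
  rw [hlist]
  have hmap : (pvPairs c).map (fun ab => pvGet3 dp (r - 1) ab.1 ab.2)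
      = (pvPairs c).map (fun ab => pvV grid c (r - 1).toNat ab.1 ab.2) := by
    refine List.map_congr_left (fun p hp => ?_)
    obtain ⟨q1, q2, q3, q4⟩ := pv_mem_pvPairs hp
    exact hfin (r - 1) p.1 p.2 (by omega) (by omega) q1 q2 q3 q4
  rw [hmap]

theorem pvA_eq (r c : Int) (grid : List (List Int)) (hr : 1 ≤ r) :
    maximumChocolates r c grid
      = (PySem.List.max? ((pvPairs c).map (fun ab => pvV grid c (r - 1).toNat ab.1 ab.2))
          (fun x => x)).getD 0 := by
  rw [maximumChocolates]
  have hd0 := pv_dp0_shape r c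
  have hbase := pv_rowloop (r := r) (c := c) 0
      (fun _ a b => pvAt grid 0 a + (if a ≠ b then pvAt grid 0 b else 0))
      le_rfl (by omega)
      (fun _ _ _ _ _ _ _ _ _ _ _ => rfl)
      (PySem.List.pyRange 0 c 1)
      (fun x hx => by rw [PySem.List.mem_pyRange_one] at hx; exact hx)
      _ hd0
  have hinvbase : ∀ i j k : Int, 0 ≤ i → i < 1 → i < r → 0 ≤ j → j < c → 0 ≤ k → k < c →
      pvGet3 ((PySem.List.pyRange 0 c 1).foldl (fun dp a =>
        (PySem.List.pyRange 0 c 1).foldl (fun dp b =>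
          pvSet3 dp 0 a b (pvAt grid 0 a + (if a ≠ b then pvAt grid 0 b else 0))) dp)
        ((PySem.List.pyRange 0 r 1).map (fun _ =>
          (PySem.List.pyRange 0 c 1).map (fun _ => List.replicate c.toNat (0 : Int))))) i j k
        = pvV grid c i.toNat j k := by
    intro i j k h1 h2 h3 h4 h5 h6 h7
    have hi0 : i = 0 := by omega
    subst hi0
    have hb := hbase.2.2 0 j k le_rfl h4 h6
    rw [hb, if_pos ⟨rfl, by rw [PySem.List.mem_pyRange_one]; exact ⟨h4, h5⟩, ⟨h6, h7⟩⟩]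
    rfl
  have hmain := pv_mainloop (r := r) (c := c) grid ((r - 1).toNat) 1 (by omega) (by omega)
      _ hbase.1 hinvbase
  exact pvA_final r c grid _ hr hmain.2

-- ===== VERDICT (by name: the statement is the Claim_ definition above) =====
theorem maximumChocolates_spec : Claim_equal_maximumChocolates := by
  intro r c grid _ hpre
  unfold Spec_maximumChocolates
  rw [pvA_eq r c grid hpre.1, pvB_alt_eq r c grid]
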